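-- pv_equiv track=rewrite | github.com/elit3ge/deleterr | modules/tautulli.py | filter_by_most_recent
-- ===== SOURCE A (Python) =====
-- def filter_by_most_recent(data, key, sort_key):
--     # Create an empty dictionary to hold the highest stopped value for each id
--     max_sort_key = {}
--
--     # Go through each dictionary in the list
--     for item in data:
--         id_ = item[key]
--         sort_key_value = item[sort_key]
--
--         # If the id isn't in max_sort_key, add it
--         # If it is, but the current sort_key value is higher than the saved one, replace it
--         if id_ not in max_sort_key or sort_key_value > max_sort_key[id_][sort_key]:
--             max_sort_key[id_] = item
--
--     # Convert the resulting max_sort_key dictionary to a list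
--     return list(max_sort_key.values())
-- ===== SOURCE B (Python) =====
-- def filter_by_most_recent(data, key, sort_key):
--     # Phase 1: group the items by their id, in first-appearance order.
--     groups = {}
--     for item in data:
--         groups.setdefault(item[key], []).append(item)
--     # Phase 2: reduce each group to its first item with maximal sort_key
--     # (max returns the first maximal element, matching A's strict '>' update).
--     return [max(group, key=lambda it: it[sort_key]) for group in groups.values()]
-- ===== Notes on version B (the rewrite author's own statement) =====
-- stated objective: alternative
-- what changed: Replaces A's single running-max pass (dict of current best item per id, updated in place) with a two-phase collect-then-reduce: first group all items by id into lists in a dict, then take max(group, key=sort_key) of each bucket.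
import Mathlib
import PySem

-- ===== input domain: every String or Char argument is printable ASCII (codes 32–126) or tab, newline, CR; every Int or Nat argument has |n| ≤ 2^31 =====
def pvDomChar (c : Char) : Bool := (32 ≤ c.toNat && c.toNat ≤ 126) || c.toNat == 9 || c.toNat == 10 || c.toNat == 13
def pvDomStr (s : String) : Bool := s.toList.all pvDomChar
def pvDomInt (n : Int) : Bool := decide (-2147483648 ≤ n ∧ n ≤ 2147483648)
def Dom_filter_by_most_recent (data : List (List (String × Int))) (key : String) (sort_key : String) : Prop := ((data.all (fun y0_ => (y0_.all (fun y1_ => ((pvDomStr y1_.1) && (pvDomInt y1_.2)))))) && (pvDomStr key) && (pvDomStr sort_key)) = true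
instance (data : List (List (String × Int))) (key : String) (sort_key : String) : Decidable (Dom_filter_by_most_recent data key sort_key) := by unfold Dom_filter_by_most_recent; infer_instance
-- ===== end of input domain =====

-- B replaces A's single running-max pass with a two-phase collect-then-reduce of the same
-- cost (group the items by id into a dict of lists, then take the first max per bucket);
-- objective: alternative decomposition, not speed.

-- item[k] for a Python dict item (first-match lookup on the association list); the
-- `.getD 0` default is never reached on inputs satisfying Pre_ (both keys present).
def pvItemD (it : List (String × Int)) (k : String) : Int :=
  ((PySem.Dict.mk it).get? k).getD 0

-- ===== PORT A =====
-- the body of A's `for item in data` loop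
def pvStepA (key sort_key : String) (m : PySem.Dict Int (List (String × Int)))
    (item : List (String × Int)) : PySem.Dict Int (List (String × Int)) :=
  let id_ := pvItemD item key
  let sort_key_value := pvItemD item sort_key
  match m.get? id_ with
  | none => m.insert id_ item
  | some cur => if sort_key_value > pvItemD cur sort_key then m.insert id_ item else m

def filter_by_most_recent (data : List (List (String × Int))) (key : String) (sort_key : String) : List (List (String × Int)) :=
  (data.foldl (pvStepA key sort_key) PySem.Dict.empty).values

-- ===== PORT B =====
-- groups.setdefault(item[key], []).append(item)
def pvStepB (key : String) (d : PySem.Dict Int (List (List (String × Int))))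
    (item : List (String × Int)) : PySem.Dict Int (List (List (String × Int))) :=
  d.modify (pvItemD item key) [] (fun g => g ++ [item])

-- max(group, key=lambda it: it[sort_key]) — Python's max keeps the FIRST maximal element
def pvBest (sort_key : String) (g : List (List (String × Int))) : List (String × Int) :=
  match g with
  | [] => []
  | h :: t => t.foldl (fun best it => if pvItemD it sort_key > pvItemD best sort_key then it else best) h

def filter_by_most_recent_alt (data : List (List (String × Int))) (key : String) (sort_key : String) : List (List (String × Int)) :=
  ((data.foldl (pvStepB key) PySem.Dict.empty).values).map (pvBest sort_key)

-- ===== PRECONDITION & SPEC =====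
-- Exactly the inputs on which the Python A returns: every item must contain both `key`
-- and `sort_key` (otherwise `item[key]` / `item[sort_key]` raises KeyError).
def Pre_filter_by_most_recent (data : List (List (String × Int))) (key : String) (sort_key : String) : Prop :=
  ∀ it ∈ data, (∃ p ∈ it, p.1 = key) ∧ (∃ p ∈ it, p.1 = sort_key)
instance (data : List (List (String × Int))) (key : String) (sort_key : String) : Decidable (Pre_filter_by_most_recent data key sort_key) := by unfold Pre_filter_by_most_recent; infer_instance

def pvWitness_filter_by_most_recent : (List (List (String × Int))) × String × String :=
  ([[("id", 1), ("stopped", 5)], [("id", 1), ("stopped", 7)], [("id", 2), ("stopped", 3)]], "id", "stopped")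

def Spec_filter_by_most_recent (data : List (List (String × Int))) (key : String) (sort_key : String) (out : List (List (String × Int))) : Prop := out = filter_by_most_recent_alt data key sort_key
instance (data : List (List (String × Int))) (key : String) (sort_key : String) (out : List (List (String × Int))) : Decidable (Spec_filter_by_most_recent data key sort_key out) := by unfold Spec_filter_by_most_recent; infer_instance

-- ===== CLAIM (what is proved, stated in full; the proofs are below) =====
def Claim_equal_filter_by_most_recent : Prop := ∀ (data : List (List (String × Int))) (key : String) (sort_key : String), Dom_filter_by_most_recent data key sort_key → Pre_filter_by_most_recent data key sort_key → Spec_filter_by_most_recent data key sort_key (filter_by_most_recent data key sort_key)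

-- ===== LEMMAS AND PROOFS =====

-- the simulation map: B's dict of groups, reduced pointwise, IS A's dict of best items
def pvF (sort_key : String) (p : Int × List (List (String × Int))) : Int × List (String × Int) :=
  (p.1, pvBest sort_key p.2)

def pvMapD (sort_key : String) (d : PySem.Dict Int (List (List (String × Int)))) :
    PySem.Dict Int (List (String × Int)) :=
  ⟨d.items.map (pvF sort_key)⟩

theorem pv_get?_mapD (sk : String) (d : PySem.Dict Int (List (List (String × Int)))) (k : Int) :
    (pvMapD sk d).get? k = (d.get? k).map (pvBest sk) := by
  simp [pvMapD, PySem.Dict.get?, List.find?_map, Function.comp_def, pvF, Option.map_map]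

theorem pv_keys_mapD (sk : String) (d : PySem.Dict Int (List (List (String × Int)))) :
    (pvMapD sk d).keys = d.keys := by
  simp [pvMapD, PySem.Dict.keys, pvF]

theorem pv_contains_mapD (sk : String) (d : PySem.Dict Int (List (List (String × Int)))) (k : Int) :
    (pvMapD sk d).contains k = d.contains k := by
  simp [pvMapD, PySem.Dict.contains, List.any_map, Function.comp_def, pvF]

theorem pv_mapD_insert (sk : String) (d : PySem.Dict Int (List (List (String × Int))))
    (k : Int) (g : List (List (String × Int))) :
    pvMapD sk (d.insert k g) = (pvMapD sk d).insert k (pvBest sk g) := by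
  apply PySem.Dict.ext
  simp only [PySem.Dict.insert, pv_contains_mapD]
  by_cases h : d.contains k = true
  · simp only [h, if_pos]
    simp only [pvMapD, List.map_map]
    apply List.map_congr_left
    intro p _
    by_cases hk : (p.1 == k) = true
    · simp [Function.comp, hk, pvF]
    · simp [Function.comp, hk, pvF]
  · simp only [h, if_false]
    simp [pvMapD, pvF]

-- inserting the value a key already maps to is a no-op (keys unique)
theorem pv_insert_existing {ν : Type} (d : PySem.Dict Int ν) (k : Int) (v : ν)
    (hnd : d.keys.Nodup) (h : d.get? k = some v) : d.insert k v = d := by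
  apply PySem.Dict.ext
  have hc : d.contains k = true := by
    rw [PySem.Dict.contains_eq_isSome_get?, h]; rfl
  rw [PySem.Dict.items_insert_of_contains d v hc]
  conv_rhs => rw [← List.map_id d.items]
  apply List.map_congr_left (fun p hp => ?_)
  by_cases hk : (p.1 == k) = true
  · have hk' : p.1 = k := by simpa using hk
    have hp2 : d.get? p.1 = some p.2 :=
      PySem.Dict.get?_of_mem_items d (by simpa using hp) hnd
    rw [hk', h] at hp2
    have hv : v = p.2 := (Option.some.injEq _ _).mp hp2
    simp [hv, ← hk']
  · simp [hk]

theorem pv_best_append (sk : String) (g : List (List (String × Int))) (x : List (String × Int))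
    (hg : g ≠ []) :
    pvBest sk (g ++ [x]) =
      if pvItemD x sk > pvItemD (pvBest sk g) sk then x else pvBest sk g := by
  cases g with
  | nil => exact absurd rfl hg
  | cons h t => simp [pvBest, List.foldl_append]

-- one loop iteration: A's step on the reduced dict = reduce after B's step
theorem pv_step (key sk : String) (d : PySem.Dict Int (List (List (String × Int))))
    (item : List (String × Int)) (hnd : d.keys.Nodup)
    (hne : ∀ p ∈ d.items, p.2 ≠ []) :
    pvStepA key sk (pvMapD sk d) item = pvMapD sk (pvStepB key d item) := by
  unfold pvStepA pvStepB PySem.Dict.modify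
  rw [pv_mapD_insert]
  cases h : d.get? (pvItemD item key) with
  | none =>
    have hd : d.getD (pvItemD item key) [] = [] := PySem.Dict.getD_of_get?_eq_none _ _ h
    simp [pv_get?_mapD, h, hd, pvBest]
  | some g =>
    have hgd : d.getD (pvItemD item key) [] = g := PySem.Dict.getD_of_get?_eq_some _ _ h
    have hgne : g ≠ [] := hne _ (PySem.Dict.mem_items_of_get?_eq_some _ h)
    simp only [pv_get?_mapD, h, Option.map_some, hgd]
    rw [pv_best_append sk g item hgne]
    by_cases hcmp : pvItemD item sk > pvItemD (pvBest sk g) sk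
    · simp [hcmp]
    · simp only [hcmp, if_false]
      symm
      apply pv_insert_existing
      · rw [pv_keys_mapD]; exact hnd
      · rw [pv_get?_mapD, h]; rfl

theorem pv_loop (key sk : String) (data : List (List (String × Int))) :
    ∀ (d : PySem.Dict Int (List (List (String × Int)))), d.keys.Nodup →
      (∀ p ∈ d.items, p.2 ≠ []) →
      data.foldl (pvStepA key sk) (pvMapD sk d) = pvMapD sk (data.foldl (pvStepB key) d) := by
  induction data with
  | nil => intro d _ _; rfl
  | cons item rest ih =>
    intro d hnd hne
    simp only [List.foldl_cons]
    rw [pv_step key sk d item hnd hne]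
    apply ih
    · exact PySem.Dict.nodup_keys_insert _ _ _ hnd
    · intro p hp
      rcases (PySem.Dict.mem_items_insert _ _ _ _).mp hp with h | ⟨h, _⟩
      · subst h; simp
      · exact hne _ h

-- ===== VERDICT (by name: the statement is the Claim_ definition above) =====
theorem filter_by_most_recent_spec : Claim_equal_filter_by_most_recent := by
  intro data key sort_key _ _
  unfold Spec_filter_by_most_recent filter_by_most_recent filter_by_most_recent_alt
  have h0 : (PySem.Dict.empty : PySem.Dict Int (List (String × Int))) =
      pvMapD sort_key PySem.Dict.empty := rfl
  rw [h0, pv_loop key sort_key data PySem.Dict.empty (by simp [PySem.Dict.empty, PySem.Dict.keys])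
      (by simp [PySem.Dict.empty])]
  simp [pvMapD, PySem.Dict.values, List.map_map, Function.comp_def, pvF]
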